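-- pv_equiv track=rewrite | github.com/sanmusen214/Get_some_leetcodes | 0032.py | dramatic
-- ===== SOURCE A (Python) =====
-- def dramatic(listr):
--     done=0
--     for i in range(len(listr)):
--         if(listr[i]=="("):
--             for j in range(i+1,len(listr)):
--                 if(listr[j]=="0"):
--                     continue
--                 if(listr[j]=="("):
--                     break
--                 if(listr[j]==")"):
--                     listr[i]=listr[j]="0"
--                     done=1
--                     break
--     if(done==1):
--         return dramatic(listr)
--     if(done==0):
--         return listr
-- ===== SOURCE B (Python) =====
-- # Single stack pass: push indices of "(", on ")" pop and zero both (mutates listr in place, like A; a different algorithm, same result).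
-- def dramatic(listr):
--     stack = []
--     for i, c in enumerate(listr):
--         if c == "(":
--             stack.append(i)
--         elif c == ")":
--             if stack:
--                 listr[stack.pop()] = "0"
--                 listr[i] = "0"
--     return listr
-- ===== Notes on version B (the rewrite author's own statement) =====
-- stated objective: alternative
-- what changed: Replaced A's repeated full rescans (nested index loops inside a recursion that restarts until no pair is found) by a single left-to-right pass with a stack of open-parenthesis indices, zeroing a matched pair the moment its ')' is seen.
import Mathlib
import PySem

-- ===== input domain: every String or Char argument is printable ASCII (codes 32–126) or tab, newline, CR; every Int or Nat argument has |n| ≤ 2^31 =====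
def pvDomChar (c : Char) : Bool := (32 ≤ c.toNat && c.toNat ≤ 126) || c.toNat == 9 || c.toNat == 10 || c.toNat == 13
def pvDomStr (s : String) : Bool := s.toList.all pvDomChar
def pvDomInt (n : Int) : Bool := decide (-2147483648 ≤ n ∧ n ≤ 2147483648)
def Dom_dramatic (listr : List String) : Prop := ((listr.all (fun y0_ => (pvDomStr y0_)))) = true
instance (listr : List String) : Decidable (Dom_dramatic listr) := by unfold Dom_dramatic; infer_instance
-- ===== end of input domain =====

-- B replaces A's repeated rescans by a single stack pass (a different algorithm, not claimed faster here);
-- both Pythons mutate listr in place and return it — the equivalence proved here is about the return value.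

-- ===== PORT A =====
-- inner 'for j in range(i+1, n)' loop of A: skips "0" and other non-paren strings,
-- breaks with none on "(", returns the index of the first ")" otherwise.
def innerF (l : List String) (n : Nat) : Nat → Nat → Option Nat
  | j, rem+1 =>
    if j < n then
      if l.getD j "" = "0" then innerF l n (j+1) rem
      else if l.getD j "" = "(" then none
      else if l.getD j "" = ")" then some j
      else innerF l n (j+1) rem
    else none
  | _, 0 => none

def innerA (l : List String) (j n : Nat) : Option Nat := innerF l n j (n - j)

-- outer 'for i in range(n)' loop of A, carrying the (mutated) list and the done flag
def outerF (n : Nat) : List String → Bool → Nat → Nat → List String × Bool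
  | l, done, i, rem+1 =>
    if i < n then
      if l.getD i "" = "(" then
        match innerA l (i+1) n with
        | some j => outerF n ((l.set i "0").set j "0") true (i+1) rem
        | none => outerF n l done (i+1) rem
      else outerF n l done (i+1) rem
    else (l, done)
  | l, done, _, 0 => (l, done)

def outerA (l : List String) (done : Bool) (i n : Nat) : List String × Bool :=
  outerF n l done i (n - i)

-- number of "(" entries: termination measure for A's self-recursion
def opens (l : List String) : Nat := l.countP (· == "(")

-- A's top-level self-recursion: rerun the pass while done == 1. The fuel counter
-- (opens listr + 1) is a pure totality guard: each rerun strictly decreases the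
-- number of "(" entries, so the 0-fuel branch is never reached.
def dramaticFuel : Nat → List String → List String
  | 0, l => l
  | f+1, l =>
    let r := outerA l false 0 l.length
    if r.2 then dramaticFuel f r.1 else r.1

def dramatic (listr : List String) : List String :=
  dramaticFuel (opens listr + 1) listr

-- ===== PORT B =====
-- one pass over the indices, stack st holds indices of still-unmatched "("
-- the ')' step: zero the top-of-stack '(' and the current ')' (no-op on an empty stack)
def popL (l : List String) (i : Nat) (st : List Nat) : List String :=
  match st with
  | [] => l
  | t :: _ => (l.set t "0").set i "0"

def altF : List String → Nat → List Nat → Nat → List String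
  | l, i, st, rem+1 =>
    if i < l.length then
      if l.getD i "" = "(" then altF l (i+1) (i :: st) rem
      else if l.getD i "" = ")" then altF (popL l i st) (i+1) st.tail rem
      else altF l (i+1) st rem
    else l
  | l, _, _, 0 => l

def altGo (l : List String) (i : Nat) (st : List Nat) : List String :=
  altF l i st (l.length - i)

def dramatic_alt (listr : List String) : List String := altGo listr 0 []

-- ===== PRECONDITION & SPEC =====
def Spec_dramatic (listr : List String) (out : List String) : Prop := out = dramatic_alt listr
instance (listr : List String) (out : List String) : Decidable (Spec_dramatic listr out) := by unfold Spec_dramatic; infer_instance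

-- ===== CLAIM (what is proved, stated in full; the proofs are below) =====
def Claim_equal_dramatic : Prop := ∀ (listr : List String), Dom_dramatic listr → Spec_dramatic listr (dramatic listr)

-- ===== LEMMAS AND PROOFS =====

-- step (unfolding) lemmas for the loop functions
theorem innerA_eq (l : List String) (j n : Nat) :
    innerA l j n = if j < n then
      if l.getD j "" = "0" then innerA l (j+1) n
      else if l.getD j "" = "(" then none
      else if l.getD j "" = ")" then some j
      else innerA l (j+1) n
    else none := by
  unfold innerA
  by_cases h : j < n
  · rw [show n - j = (n - (j+1)) + 1 from by omega, innerF, if_pos h]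
  · rcases hn : n - j with _ | rem
    · rw [if_neg h]; rfl
    · rw [innerF, if_neg h, if_neg h]

theorem outerA_stop (l : List String) (d : Bool) (i n : Nat) (h : ¬ i < n) :
    outerA l d i n = (l, d) := by
  unfold outerA
  rcases hn : n - i with _ | rem
  · rfl
  · rw [outerF, if_neg h]

theorem outerA_skip (l : List String) (d : Bool) (i n : Nat) (h : i < n)
    (hp : l.getD i "" ≠ "(") : outerA l d i n = outerA l d (i+1) n := by
  unfold outerA
  rw [show n - i = (n - (i+1)) + 1 from by omega, outerF, if_pos h, if_neg hp]

theorem outerA_none (l : List String) (d : Bool) (i n : Nat) (h : i < n)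
    (hp : l.getD i "" = "(") (hj : innerA l (i+1) n = none) :
    outerA l d i n = outerA l d (i+1) n := by
  unfold outerA
  rw [show n - i = (n - (i+1)) + 1 from by omega, outerF, if_pos h, if_pos hp, hj]

theorem outerA_some (l : List String) (d : Bool) (i n j : Nat) (h : i < n)
    (hp : l.getD i "" = "(") (hj : innerA l (i+1) n = some j) :
    outerA l d i n = outerA ((l.set i "0").set j "0") true (i+1) n := by
  unfold outerA
  rw [show n - i = (n - (i+1)) + 1 from by omega, outerF, if_pos h, if_pos hp, hj]

theorem countP_set_opens (l : List String) (i : Nat) (hi : i < l.length) :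
    (l.set i "0").countP (· == "(") + (if l.getD i "" = "(" then 1 else 0)
      = l.countP (· == "(") := by
  induction l generalizing i with
  | nil => simp at hi
  | cons a t ih =>
    cases i with
    | zero =>
      simp only [List.set_cons_zero, List.countP_cons, List.getD_cons_zero]
      by_cases h : a = "(" <;> simp [h]
    | succ k =>
      simp only [List.set_cons_succ, List.countP_cons, List.getD_cons_succ]
      have := ih k (by simpa using hi)
      omega

theorem innerA_sound (l : List String) (n : Nat) :
    ∀ (j j' : Nat), innerA l j n = some j' →
    j ≤ j' ∧ j' < n ∧ l.getD j' "" = ")" ∧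
      (∀ p, j ≤ p → p < j' → l.getD p "" ≠ "(" ∧ l.getD p "" ≠ ")") := by
  intro j j' h
  induction hd : n - j generalizing j with
  | zero => rw [innerA_eq, if_neg (by omega)] at h; exact absurd h (by simp)
  | succ m ih =>
    have hj : j < n := by omega
    rw [innerA_eq, if_pos hj] at h
    by_cases h0 : l.getD j "" = "0"
    · rw [if_pos h0] at h
      obtain ⟨h1, h2, h3, h4⟩ := ih (j+1) h (by omega)
      refine ⟨by omega, h2, h3, ?_⟩
      intro p hp1 hp2
      rcases Nat.eq_or_lt_of_le hp1 with rfl | hlt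
      · rw [h0]; exact ⟨by decide, by decide⟩
      · exact h4 p hlt hp2
    · rw [if_neg h0] at h
      by_cases h1 : l.getD j "" = "("
      · rw [if_pos h1] at h; exact absurd h (by simp)
      · rw [if_neg h1] at h
        by_cases h2 : l.getD j "" = ")"
        · rw [if_pos h2] at h
          obtain rfl : j = j' := by simpa using h
          exact ⟨le_rfl, hj, h2, fun p hp1 hp2 => absurd hp1 (by omega)⟩
        · rw [if_neg h2] at h
          obtain ⟨g1, g2, g3, g4⟩ := ih (j+1) h (by omega)
          refine ⟨by omega, g2, g3, ?_⟩
          intro p hp1 hp2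
          rcases Nat.eq_or_lt_of_le hp1 with rfl | hlt
          · exact ⟨h1, h2⟩
          · exact g4 p hlt hp2

theorem opens_zero_redex (l : List String) (i j : Nat) (hij : i < j) (hjlen : j < l.length)
    (hi : l.getD i "" = "(") (hj : l.getD j "" = ")") :
    opens ((l.set i "0").set j "0") + 1 = opens l := by
  have e1 := countP_set_opens l i (by omega)
  have e2 := countP_set_opens (l.set i "0") j (by simpa using hjlen)
  rw [if_pos hi] at e1
  have hjv : (l.set i "0").getD j "" = ")" := by
    rw [List.getD_eq_getElem?_getD, List.getElem?_set_ne (by omega), ← List.getD_eq_getElem?_getD, hj]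
  rw [hjv, if_neg (by decide)] at e2
  simp only [opens] at *
  omega

theorem outerA_opens_le (l : List String) (d : Bool) (i n : Nat) (hn : n = l.length) :
    opens (outerA l d i n).1 ≤ opens l := by
  induction hd : n - i generalizing l d i with
  | zero => rw [outerA_stop l d i n (by omega)]
  | succ m ih =>
    have hi : i < n := by omega
    by_cases hp : l.getD i "" = "("
    · rcases hj : innerA l (i+1) n with _ | j
      · rw [outerA_none l d i n hi hp hj]; exact ih l d (i+1) hn (by omega)
      · rw [outerA_some l d i n j hi hp hj]
        obtain ⟨h1, h2, h3, _⟩ := innerA_sound l n (i+1) j hj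
        have key := opens_zero_redex l i j (by omega) (by omega) hp h3
        have := ih ((l.set i "0").set j "0") true (i+1) (by simp [hn]) (by omega)
        omega
    · rw [outerA_skip l d i n hi hp]; exact ih l d (i+1) hn (by omega)

theorem outerA_opens_lt (l : List String) (i n : Nat) (hn : n = l.length)
    (h : (outerA l false i n).2 = true) : opens (outerA l false i n).1 < opens l := by
  induction hd : n - i generalizing l i with
  | zero =>
    rw [outerA_stop l false i n (by omega)] at h
    exact absurd h (by simp)
  | succ m ih =>
    have hi : i < n := by omega
    by_cases hp : l.getD i "" = "("
    · rcases hj : innerA l (i+1) n with _ | j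
      · rw [outerA_none l false i n hi hp hj] at h ⊢
        exact ih l (i+1) hn h (by omega)
      · rw [outerA_some l false i n j hi hp hj] at h ⊢
        obtain ⟨h1, h2, h3, _⟩ := innerA_sound l n (i+1) j hj
        have key := opens_zero_redex l i j (by omega) (by omega) hp h3
        have hle := outerA_opens_le ((l.set i "0").set j "0") true (i+1) n (by simp [hn])
        omega
    · rw [outerA_skip l false i n hi hp] at h ⊢
      exact ih l (i+1) hn h (by omega)


-- step (unfolding) lemmas for B's loop
theorem altGo_stop (l : List String) (i : Nat) (st : List Nat) (h : ¬ i < l.length) :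
    altGo l i st = l := by
  unfold altGo
  rcases hn : l.length - i with _ | rem
  · rfl
  · rw [altF, if_neg h]


theorem altGo_open (l : List String) (i : Nat) (st : List Nat) (h : i < l.length)
    (hp : l.getD i "" = "(") : altGo l i st = altGo l (i+1) (i :: st) := by
  unfold altGo
  rw [show l.length - i = (l.length - (i+1)) + 1 from by omega, altF, if_pos h, if_pos hp]

theorem altGo_close_nil (l : List String) (i : Nat) (h : i < l.length)
    (hp : l.getD i "" ≠ "(") (hc : l.getD i "" = ")") :
    altGo l i [] = altGo l (i+1) [] := by
  unfold altGo
  rw [show l.length - i = (l.length - (i+1)) + 1 from by omega, altF, if_pos h, if_neg hp, if_pos hc]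
  rfl

theorem altGo_close_cons (l : List String) (i t : Nat) (st' : List Nat) (h : i < l.length)
    (hp : l.getD i "" ≠ "(") (hc : l.getD i "" = ")") :
    altGo l i (t :: st') = altGo ((l.set t "0").set i "0") (i+1) st' := by
  unfold altGo
  rw [show l.length - i = (l.length - (i+1)) + 1 from by omega, altF, if_pos h, if_neg hp, if_pos hc]
  show altF ((l.set t "0").set i "0") (i+1) st' (l.length - (i+1)) = _
  rw [show l.length - (i+1) = ((l.set t "0").set i "0").length - (i+1) by simp]

theorem altGo_other (l : List String) (i : Nat) (st : List Nat) (h : i < l.length)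
    (hp : l.getD i "" ≠ "(") (hc : l.getD i "" ≠ ")") :
    altGo l i st = altGo l (i+1) st := by
  unfold altGo
  rw [show l.length - i = (l.length - (i+1)) + 1 from by omega, altF, if_pos h, if_neg hp, if_neg hc]

theorem innerA_complete (l : List String) (n j : Nat) (hjn : j < n)
    (hj : l.getD j "" = ")") :
    ∀ k, k ≤ j → (∀ p, k ≤ p → p < j → l.getD p "" ≠ "(" ∧ l.getD p "" ≠ ")") →
      innerA l k n = some j := by
  intro k hk hgap
  induction hd : j - k generalizing k with
  | zero =>
    obtain rfl : k = j := by omega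
    rw [innerA_eq, if_pos hjn]
    have : l.getD k "" ≠ "0" := by rw [hj]; decide
    rw [if_neg this, if_neg (by rw [hj]; decide), if_pos hj]
  | succ m ih =>
    have hkj : k < j := by omega
    have hkn : k < n := by omega
    obtain ⟨hno, hnc⟩ := hgap k le_rfl hkj
    have step : innerA l (k+1) n = some j :=
      ih (k+1) (by omega) (fun p hp1 hp2 => hgap p (by omega) hp2) (by omega)
    rw [innerA_eq, if_pos hkn]
    by_cases h0 : l.getD k "" = "0"
    · rw [if_pos h0]; exact step
    · rw [if_neg h0, if_neg hno, if_neg hnc]; exact step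


-- a redex: "(" at i, ")" at j, no parenthesis strictly between
def Redex (l : List String) (i j : Nat) : Prop :=
  i < j ∧ j < l.length ∧ l.getD i "" = "(" ∧ l.getD j "" = ")" ∧
    ∀ p, i < p → p < j → l.getD p "" ≠ "(" ∧ l.getD p "" ≠ ")"

theorem getD_set_ne (l : List String) (i j : Nat) (x : String) (h : i ≠ j) :
    (l.set i x).getD j "" = l.getD j "" := by
  rw [List.getD_eq_getElem?_getD, List.getElem?_set_ne h, ← List.getD_eq_getElem?_getD]

theorem getD_set_self (l : List String) (i : Nat) (x : String) (h : i < l.length) :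
    (l.set i x).getD i "" = x := by
  rw [List.getD_eq_getElem?_getD, List.getElem?_set_self h]; rfl

-- phase 2 of the zeroing-commutes argument: between i and j the stacked i rides along
theorem altGo_phase2 (m : List String) (i j : Nat) (h : Redex m i j) :
    ∀ k st, i < k → k ≤ j →
      altGo m k (i :: st) = altGo ((m.set i "0").set j "0") k st := by
  obtain ⟨hij, hjlen, hi, hj, hgap⟩ := h
  intro k st hik hkj
  induction hd : j - k generalizing k with
  | zero =>
    obtain rfl : k = j := by omega
    have hm2j : ((m.set i "0").set k "0").getD k "" = "0" :=
      getD_set_self _ k "0" (by simpa using hjlen)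
    rw [altGo_close_cons m k i st hjlen (by rw [hj]; decide) hj]
    rw [altGo_other ((m.set i "0").set k "0") k st (by simpa using hjlen)
      (by rw [hm2j]; decide) (by rw [hm2j]; decide)]
  | succ d ih =>
    have hkj' : k < j := by omega
    have hklen : k < m.length := by omega
    obtain ⟨hno, hnc⟩ := hgap k hik hkj'
    have hm2k : ((m.set i "0").set j "0").getD k "" = m.getD k "" := by
      rw [getD_set_ne _ _ _ _ (by omega), getD_set_ne _ _ _ _ (by omega)]
    rw [altGo_other m k (i :: st) hklen hno hnc]
    rw [altGo_other ((m.set i "0").set j "0") k st (by simpa using hklen)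
      (by rw [hm2k]; exact hno) (by rw [hm2k]; exact hnc)]
    exact ih (k+1) (by omega) (by omega) (by omega)

-- phase 1: before reaching i the two runs act identically (matches commute with the (i,j) zeroing)
theorem altGo_phase1 (i j : Nat) :
    ∀ (d : Nat) (m : List String) (k : Nat) (st : List Nat), Redex m i j → k ≤ i → d = i - k →
      (∀ t ∈ st, t < k) →
      altGo m k st = altGo ((m.set i "0").set j "0") k st := by
  intro d
  induction d with
  | zero =>
    intro m k st h hk hd hst
    obtain rfl : k = i := by omega
    obtain ⟨hij, hjlen, hi, hj, hgap⟩ := h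
    have hilen : k < m.length := by omega
    have hm2i : ((m.set k "0").set j "0").getD k "" = "0" := by
      rw [getD_set_ne _ _ _ _ (by omega), getD_set_self _ k "0" hilen]
    rw [altGo_open m k st hilen hi]
    rw [altGo_other ((m.set k "0").set j "0") k st (by simpa using hilen)
      (by rw [hm2i]; decide) (by rw [hm2i]; decide)]
    exact altGo_phase2 m k j ⟨hij, hjlen, hi, hj, hgap⟩ (k+1) st (by omega) (by omega)
  | succ d ih =>
    intro m k st h hk hd hst
    obtain ⟨hij, hjlen, hi, hj, hgap⟩ := h
    have hki : k < i := by omega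
    have hklen : k < m.length := by omega
    have hm2k : ((m.set i "0").set j "0").getD k "" = m.getD k "" := by
      rw [getD_set_ne _ _ _ _ (by omega), getD_set_ne _ _ _ _ (by omega)]
    by_cases hpo : m.getD k "" = "("
    · rw [altGo_open m k st hklen hpo]
      rw [altGo_open ((m.set i "0").set j "0") k st (by simpa using hklen)
        (by rw [hm2k]; exact hpo)]
      exact ih m (k+1) (k :: st) ⟨hij, hjlen, hi, hj, hgap⟩ (by omega) (by omega)
        (by intro t ht
            simp only [List.mem_cons] at ht
            cases ht with
            | inl h => omega
            | inr h => have := hst t h; omega)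
    · by_cases hpc : m.getD k "" = ")"
      · cases st with
        | nil =>
          rw [altGo_close_nil m k hklen hpo hpc]
          rw [altGo_close_nil ((m.set i "0").set j "0") k (by simpa using hklen)
            (by rw [hm2k]; exact hpo) (by rw [hm2k]; exact hpc)]
          exact ih m (k+1) [] ⟨hij, hjlen, hi, hj, hgap⟩ (by omega) (by omega) (by simp)
        | cons t st' =>
          have htk : t < k := hst t (by simp)
          rw [altGo_close_cons m k t st' hklen hpo hpc]
          rw [altGo_close_cons ((m.set i "0").set j "0") k t st' (by simpa using hklen)
            (by rw [hm2k]; exact hpo) (by rw [hm2k]; exact hpc)]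
          -- both runs zero positions t and k (< i); the two zeroings commute with the (i,j) one
          have hcomm : (((m.set i "0").set j "0").set t "0").set k "0"
              = (((m.set t "0").set k "0").set i "0").set j "0" := by
            apply List.ext_getElem (by simp)
            intro p hp1 hp2
            simp only [List.getElem_set]
            split_ifs <;> rfl
          rw [hcomm]
          have hred' : Redex ((m.set t "0").set k "0") i j := by
            refine ⟨hij, by simpa using hjlen, ?_, ?_, ?_⟩
            · rw [getD_set_ne _ _ _ _ (by omega), getD_set_ne _ _ _ _ (by omega)]; exact hi
            · rw [getD_set_ne _ _ _ _ (by omega), getD_set_ne _ _ _ _ (by omega)]; exact hj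
            · intro p hp1 hp2
              rw [getD_set_ne _ _ _ _ (by omega), getD_set_ne _ _ _ _ (by omega)]
              exact hgap p hp1 hp2
          exact ih ((m.set t "0").set k "0") (k+1) st' hred' (by omega) (by omega)
            (by intro t' ht'; have := hst t' (by simp [ht']); omega)
      · rw [altGo_other m k st hklen hpo hpc]
        rw [altGo_other ((m.set i "0").set j "0") k st (by simpa using hklen)
          (by rw [hm2k]; exact hpo) (by rw [hm2k]; exact hpc)]
        exact ih m (k+1) st ⟨hij, hjlen, hi, hj, hgap⟩ (by omega) (by omega)
          (by intro t ht; have := hst t ht; omega)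

-- zeroing a redex does not change B's result
theorem alt_redex (m : List String) (i j : Nat) (h : Redex m i j) :
    dramatic_alt m = dramatic_alt ((m.set i "0").set j "0") := by
  unfold dramatic_alt
  exact altGo_phase1 i j (i - 0) m 0 [] h (by omega) rfl (by simp)

-- one pass of A is a sequence of redex zeroings, hence preserves B's result
theorem alt_outerA (l : List String) (d : Bool) (i n : Nat) (hn : n = l.length) :
    dramatic_alt (outerA l d i n).1 = dramatic_alt l := by
  induction hd : n - i generalizing l d i with
  | zero => rw [outerA_stop l d i n (by omega)]
  | succ m ih =>
    have hi : i < n := by omega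
    by_cases hp : l.getD i "" = "("
    · rcases hj : innerA l (i+1) n with _ | j
      · rw [outerA_none l d i n hi hp hj]; exact ih l d (i+1) hn (by omega)
      · rw [outerA_some l d i n j hi hp hj]
        obtain ⟨h1, h2, h3, h4⟩ := innerA_sound l n (i+1) j hj
        have hred : Redex l i j := ⟨by omega, by omega, hp, h3,
          fun p hp1 hp2 => h4 p (by omega) hp2⟩
        rw [ih ((l.set i "0").set j "0") true (i+1) (by simp [hn]) (by omega),
          ← alt_redex l i j hred]
    · rw [outerA_skip l d i n hi hp]; exact ih l d (i+1) hn (by omega)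

-- once done is true it stays true
theorem outerA_true (n : Nat) : ∀ (m : List String) (k : Nat),
    (outerA m true k n).2 = true := by
  intro m k
  induction hd : n - k generalizing m k with
  | zero => rw [outerA_stop m true k n (by omega)]
  | succ q ih =>
    have hk : k < n := by omega
    by_cases hp : m.getD k "" = "("
    · rcases hj : innerA m (k+1) n with _ | j
      · rw [outerA_none m true k n hk hp hj]; exact ih _ _ (by omega)
      · rw [outerA_some m true k n j hk hp hj]; exact ih _ _ (by omega)
    · rw [outerA_skip m true k n hk hp]; exact ih _ _ (by omega)

-- if a pass ends with done still false, the list was never changed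
theorem outerA_false_eq (l : List String) (i n : Nat)
    (h : (outerA l false i n).2 = false) : (outerA l false i n).1 = l := by
  induction hd : n - i generalizing i with
  | zero => rw [outerA_stop l false i n (by omega)]
  | succ m ih =>
    have hi : i < n := by omega
    by_cases hp : l.getD i "" = "("
    · rcases hj : innerA l (i+1) n with _ | j
      · rw [outerA_none l false i n hi hp hj] at h ⊢; exact ih (i+1) h (by omega)
      · rw [outerA_some l false i n j hi hp hj] at h
        rw [outerA_true n _ _] at h
        exact absurd h (by simp)
    · rw [outerA_skip l false i n hi hp] at h ⊢; exact ih (i+1) h (by omega)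

-- if a pass ends with done still false, no redex exists anywhere
theorem outerA_false_noredex (l : List String) (n : Nat) (hn : n = l.length)
    (h : (outerA l false 0 n).2 = false) : ∀ i j, ¬ Redex l i j := by
  intro i j hred
  obtain ⟨hij, hjlen, hi, hj, hgap⟩ := hred
  have hinner : innerA l (i+1) n = some j :=
    innerA_complete l n j (by omega) hj (i+1) (by omega)
      (fun p hp1 hp2 => hgap p (by omega) hp2)
  have key : ∀ i', i' ≤ i → (outerA l false i' n).2 = true := by
    intro i' hi'
    induction hd : i - i' generalizing i' with
    | zero =>
      obtain rfl : i' = i := by omega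
      rw [outerA_some l false i' n j (by omega) hi hinner]
      exact outerA_true n _ _
    | succ q ihq =>
      have hlt : i' < i := by omega
      have hrest := ihq (i'+1) (by omega) (by omega)
      by_cases hp' : l.getD i' "" = "("
      · rcases hj' : innerA l (i'+1) n with _ | j'
        · rw [outerA_none l false i' n (by omega) hp' hj']; exact hrest
        · rw [outerA_some l false i' n j' (by omega) hp' hj']
          exact outerA_true n _ _
      · rw [outerA_skip l false i' n (by omega) hp']; exact hrest
  exact absurd (key 0 (by omega)) (by rw [h]; simp)

-- well-formed stack for a run that has made no match: no paren between the top and the cursor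
def GoodStack (l : List String) : List Nat → Nat → Prop
  | [], _ => True
  | t :: st, k => l.getD t "" = "(" ∧ t < k ∧
      (∀ p, t < p → p < k → l.getD p "" ≠ "(" ∧ l.getD p "" ≠ ")") ∧ GoodStack l st t

theorem goodStack_ext (l : List String) (st : List Nat) (k : Nat)
    (h : GoodStack l st k) (hno : l.getD k "" ≠ "(") (hnc : l.getD k "" ≠ ")") :
    GoodStack l st (k+1) := by
  cases st with
  | nil => trivial
  | cons t st' =>
    obtain ⟨h1, h2, h3, h4⟩ := h
    refine ⟨h1, by omega, ?_, h4⟩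
    intro p hp1 hp2
    rcases Nat.lt_or_ge p k with hlt | hge
    · exact h3 p hp1 hlt
    · obtain rfl : p = k := by omega
      exact ⟨hno, hnc⟩

-- on a redex-free list B changes nothing
theorem altGo_noredex (l : List String) (hnr : ∀ i j, ¬ Redex l i j) :
    ∀ k st, GoodStack l st k → altGo l k st = l := by
  intro k st hg
  induction hd : l.length - k generalizing k st with
  | zero => rw [altGo_stop l k st (by omega)]
  | succ m ih =>
    have hk : k < l.length := by omega
    by_cases hpo : l.getD k "" = "("
    · rw [altGo_open l k st hk hpo]
      exact ih (k+1) (k :: st) ⟨hpo, by omega, fun p hp1 hp2 => by omega, hg⟩ (by omega)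
    · by_cases hpc : l.getD k "" = ")"
      · cases st with
        | nil =>
          rw [altGo_close_nil l k hk hpo hpc]
          exact ih (k+1) [] trivial (by omega)
        | cons t st' =>
          obtain ⟨h1, h2, h3, _⟩ := hg
          exact absurd ⟨h2, hk, h1, hpc, h3⟩ (hnr t k)
      · rw [altGo_other l k st hk hpo hpc]
        exact ih (k+1) st (goodStack_ext l st k hg hpo hpc) (by omega)

theorem dramaticFuel_eq_alt : ∀ (f : Nat) (l : List String), opens l < f →
    dramaticFuel f l = dramatic_alt l := by
  intro f
  induction f with
  | zero => intro l hl; omega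
  | succ f ih =>
    intro l hl
    rw [dramaticFuel]
    rcases hr : (outerA l false 0 l.length).2 with _ | _
    · simp only [if_neg (Bool.false_ne_true)]
      rw [outerA_false_eq l 0 l.length hr, dramatic_alt,
        altGo_noredex l (outerA_false_noredex l l.length rfl hr) 0 [] trivial]
    · rw [if_pos rfl]
      have hlt := outerA_opens_lt l 0 l.length rfl hr
      rw [ih (outerA l false 0 l.length).1 (by omega)]
      exact alt_outerA l false 0 l.length rfl

theorem dramatic_eq_alt (l : List String) : dramatic l = dramatic_alt l := by
  rw [dramatic]
  exact dramaticFuel_eq_alt (opens l + 1) l (by omega)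

-- ===== VERDICT (by name: the statement is the Claim_ definition above) =====
theorem dramatic_spec : Claim_equal_dramatic := by
  intro listr _
  unfold Spec_dramatic
  exact dramatic_eq_alt listr
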